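-- pv_equiv track=rewrite | github.com/bwigianto/advent_of_code_2017 | 2018/day2/run.py | twos_and_threes
-- ===== SOURCE A (Python) =====
-- import collections
--
-- def twos_and_threes(line):
--     counter = collections.Counter(line)
--     twos = 0
--     threes = 0
--     for c in counter:
--         if counter[c] == 2:
--             twos = 1
--         if counter[c] == 3:
--             threes = 1
--     return (twos, threes)
-- ===== SOURCE B (Python) =====
-- def twos_and_threes(line):
--     s = sorted(line)
--     twos = 0
--     threes = 0
--     while s:
--         k = 1
--         while k < len(s) and s[k] == s[0]:
--             k += 1
--         if k == 2:
--             twos = 1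
--         if k == 3:
--             threes = 1
--         s = s[k:]
--     return (twos, threes)
-- ===== Notes on version B (the rewrite author's own statement) =====
-- stated objective: alternative
-- what changed: Replaces the Counter dictionary and the flag loop over its keys with sort-then-scan: sort the characters and walk runs of equal characters, flagging a run of length 2 or 3.
import Mathlib
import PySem

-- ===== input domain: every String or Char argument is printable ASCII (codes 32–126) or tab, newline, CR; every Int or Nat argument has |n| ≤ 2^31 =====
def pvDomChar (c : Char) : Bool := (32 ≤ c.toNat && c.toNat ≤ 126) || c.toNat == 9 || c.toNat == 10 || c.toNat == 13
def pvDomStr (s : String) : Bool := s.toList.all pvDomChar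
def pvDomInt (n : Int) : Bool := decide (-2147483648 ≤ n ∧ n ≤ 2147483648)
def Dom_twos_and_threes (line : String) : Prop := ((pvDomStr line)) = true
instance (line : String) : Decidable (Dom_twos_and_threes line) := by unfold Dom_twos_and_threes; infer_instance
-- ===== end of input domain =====

-- B replaces A's Counter dictionary + flag loop over its keys with sort-then-scan over runs of equal characters (alternative algorithm, same result).

-- ===== PORT A =====
def twos_and_threes (line : String) : Int × Int :=
  let counter := PySem.Dict.counter line.toList
  counter.keys.foldl
    (fun (st : Int × Int) c =>
      let st := if counter.getD c 0 = 2 then (1, st.2) else st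
      if counter.getD c 0 = 3 then (st.1, 1) else st)
    (0, 0)

-- ===== PORT B =====
-- the outer 'while s:' loop of Source B; k is the inner while-loop's run length, 's = s[k:]' is the dropWhile
def runScan : List Char → Int → Int → Int × Int
  | [], twos, threes => (twos, threes)
  | c :: rest, twos, threes =>
    let k := 1 + (rest.takeWhile (fun d => d == c)).length
    runScan (rest.dropWhile (fun d => d == c))
      (if k = 2 then 1 else twos) (if k = 3 then 1 else threes)
termination_by s _ _ => s.length
decreasing_by
  exact Nat.lt_succ_of_le (List.length_dropWhile_le _ _)

def twos_and_threes_alt (line : String) : Int × Int :=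
  runScan (PySem.List.sorted line.toList (fun x => x) false) 0 0

-- ===== PRECONDITION & SPEC =====
def Spec_twos_and_threes (line : String) (out : Int × Int) : Prop := out = twos_and_threes_alt line
instance (line : String) (out : Int × Int) : Decidable (Spec_twos_and_threes line out) := by unfold Spec_twos_and_threes; infer_instance

-- ===== CLAIM (what is proved, stated in full; the proofs are below) =====
def Claim_equal_twos_and_threes : Prop := ∀ (line : String), Dom_twos_and_threes line → Spec_twos_and_threes line (twos_and_threes line)

-- ===== LEMMAS AND PROOFS =====

-- A's flag-setting fold over keys computes membership of 2 and 3 among the key counts.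
theorem foldl_flags (g : Char → Int) (ks : List Char) (t th : Int) :
    ks.foldl
      (fun (st : Int × Int) c =>
        let st := if g c = 2 then (1, st.2) else st
        if g c = 3 then (st.1, 1) else st)
      (t, th)
    = ((if 2 ∈ ks.map g then 1 else t), (if 3 ∈ ks.map g then 1 else th)) := by
  induction ks generalizing t th with
  | nil => simp
  | cons c rest ih =>
    simp only [List.foldl_cons, List.map_cons, List.mem_cons]
    by_cases h2 : g c = 2 <;> by_cases h3 : g c = 3 <;>
      simp [h2, h3, ih, eq_comm (a := (2:Int)), eq_comm (a := (3:Int))]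

-- for the counter, the key counts listed along the keys are exactly the values
theorem counter_keys_map_getD (xs : List Char) :
    (PySem.Dict.counter xs).keys.map (fun c => (PySem.Dict.counter xs).getD c 0)
      = (PySem.Dict.counter xs).values := by
  have hi := PySem.Dict.items_counter (xs := xs)
  simp only [PySem.Dict.keys, PySem.Dict.values, hi, List.map_map]
  simp [PySem.Dict.getD_counter]

-- folding two flag updates into one disjunction
theorem if_or_int (P Q : Prop) [Decidable P] [Decidable Q] (t : Int) :
    (if P then (1:Int) else if Q then 1 else t) = if Q ∨ P then 1 else t := by
  by_cases hP : P <;> by_cases hQ : Q <;> simp [hP, hQ]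

-- B's run scan over a sorted list sets each flag iff some character occurs exactly 2 (resp. 3) times.
theorem runScan_spec_fuel (n : Nat) : ∀ (s : List Char), s.length ≤ n → s.Pairwise (· ≤ ·) → ∀ (t th : Int),
    runScan s t th
      = ((if ∃ c ∈ s, s.count c = 2 then 1 else t),
         (if ∃ c ∈ s, s.count c = 3 then 1 else th)) := by
  induction n with
  | zero =>
    intro s hlen _ t th
    have : s = [] := List.eq_nil_of_length_eq_zero (Nat.le_zero.mp hlen)
    subst this; simp [runScan]
  | succ n ihn =>
    intro s hlen hs t th
    match s with
    | [] => simp [runScan]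
    | c :: rest =>
    have hsplit := List.takeWhile_append_dropWhile (p := fun d => d == c) (l := rest)
    set tw := rest.takeWhile (fun d => d == c) with htw
    set dw := rest.dropWhile (fun d => d == c) with hdw
    -- every element of tw equals c
    have htwc : ∀ x ∈ tw, x = c := by
      intro x hx
      have := List.mem_takeWhile_imp hx
      simpa using this
    -- c is ≤ every element of rest
    have hle : ∀ x ∈ rest, c ≤ x := (List.pairwise_cons.mp hs).1
    -- c ∉ dw
    have hcnd : c ∉ dw := by
      intro hmem
      cases hdwe : dw with
      | nil => simp [hdwe] at hmem
      | cons e d' =>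
        have hene : ¬ (e == c) = true := by
          have := List.head?_dropWhile_not (p := fun d => d == c) (l := rest)
          simp [← hdw, hdwe] at this
          simpa using this
        have hene' : e ≠ c := by simpa using hene
        have hdsub : dw.Sublist rest := List.dropWhile_sublist _
        have hpd : dw.Pairwise (· ≤ ·) := ((List.pairwise_cons.mp hs).2).sublist hdsub
        rw [hdwe] at hmem
        rcases List.mem_cons.mp hmem with h | h
        · exact hene' h.symm
        · -- e ≤ c from pairwise on dw, c ≤ e from hle: contradiction with e ≠ c
          have h1 : e ≤ c := by
            have := (List.pairwise_cons.mp (hdwe ▸ hpd)).1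
            exact this c h
          have h2 : c ≤ e := hle e (by
            have : e ∈ dw := by simp [hdwe]
            exact (List.dropWhile_sublist _).mem this)
          exact hene' (le_antisymm h1 h2)
    have hdsub : dw.Sublist rest := List.dropWhile_sublist _
    have hpd : dw.Pairwise (· ≤ ·) := ((List.pairwise_cons.mp hs).2).sublist hdsub
    -- count of c in the whole list is k
    have hcount_c : (c :: rest).count c = 1 + tw.length := by
      have : rest.count c = tw.length := by
        conv_lhs => rw [← hsplit]
        rw [List.count_append]
        have h1 : tw.count c = tw.length := by
          rw [List.count_eq_length]
          intro x hx; have := htwc x hx; simp [this]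
        have h2 : dw.count c = 0 := by
          rw [List.count_eq_zero]; exact hcnd
        omega
      simp [List.count_cons_self, this]; omega
    -- counts of x ≠ c agree between the whole list and dw
    have hcount_ne : ∀ x, x ≠ c → (c :: rest).count x = dw.count x := by
      intro x hx
      have : rest.count x = dw.count x := by
        conv_lhs => rw [← hsplit]
        rw [List.count_append]
        have h1 : tw.count x = 0 := by
          rw [List.count_eq_zero]; intro hm; exact hx (htwc x hm)
        omega
      have hbc : (c == x) = false := beq_false_of_ne (Ne.symm hx)
      rw [List.count_cons, hbc]
      simpa using this
    -- membership characterization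
    have hmemiff : ∀ (n : Nat), (∃ x ∈ c :: rest, (c :: rest).count x = n)
        ↔ (1 + tw.length = n ∨ ∃ x ∈ dw, dw.count x = n) := by
      intro n
      constructor
      · rintro ⟨x, hxm, hxc⟩
        by_cases hxeq : x = c
        · left; rw [hxeq] at hxc; rw [← hxc, hcount_c]
        · right
          have hxr : x ∈ rest := by
            rcases List.mem_cons.mp hxm with h | h
            · exact absurd h hxeq
            · exact h
          have hxdw : x ∈ dw := by
            rw [← hsplit] at hxr
            rcases List.mem_append.mp hxr with h | h
            · exact absurd (htwc x h) hxeq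
            · exact h
          exact ⟨x, hxdw, by rw [← hcount_ne x hxeq]; exact hxc⟩
      · rintro (h | ⟨x, hxm, hxc⟩)
        · exact ⟨c, List.mem_cons_self, by rw [hcount_c, h]⟩
        · have hxne : x ≠ c := fun he => hcnd (he ▸ hxm)
          exact ⟨x, List.mem_cons.mpr (Or.inr (hdsub.mem hxm)),
            by rw [hcount_ne x hxne]; exact hxc⟩
    -- unfold one step of runScan and apply the IH
    have hdlen : dw.length ≤ n := by
      have h1 : dw.length ≤ rest.length := List.length_dropWhile_le _ _
      simp only [List.length_cons] at hlen
      omega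
    rw [runScan]
    rw [ihn dw hdlen hpd]
    simp only [if_or_int]
    simp only [hmemiff 2, hmemiff 3]
    simp only [← htw]

-- counts and membership transfer from the input to its sorted permutation
theorem exists_count_sorted (xs : List Char) (n : Nat) :
    (∃ c ∈ PySem.List.sorted xs (fun x => x) false,
        (PySem.List.sorted xs (fun x => x) false).count c = n)
      ↔ (∃ c ∈ xs, xs.count c = n) := by
  have hp : (PySem.List.sorted xs (fun x => x) false).Perm xs := PySem.List.sorted_perm xs (fun x => x) false
  constructor
  · rintro ⟨c, hm, hc⟩; exact ⟨c, hp.mem_iff.mp hm, by rw [← hp.count_eq]; exact hc⟩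
  · rintro ⟨c, hm, hc⟩; exact ⟨c, hp.mem_iff.mpr hm, by rw [hp.count_eq]; exact hc⟩

-- membership of n among the counter's values is existence of a character with that count
theorem mem_counter_values (xs : List Char) (n : Nat) :
    ((n : Int) ∈ (PySem.Dict.counter xs).values) ↔ ∃ c ∈ xs, xs.count c = n := by
  have hi := PySem.Dict.items_counter (xs := xs)
  simp only [PySem.Dict.values, hi, List.map_map, List.mem_map, Function.comp]
  constructor
  · rintro ⟨c, hm, hc⟩
    refine ⟨c, (PySem.Set.mem_ofList xs c).mp hm, ?_⟩
    exact_mod_cast hc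
  · rintro ⟨c, hm, hc⟩
    exact ⟨c, (PySem.Set.mem_ofList xs c).mpr hm, by simp [hc]⟩

-- ===== VERDICT (by name: the statement is the Claim_ definition above) =====
theorem twos_and_threes_spec : Claim_equal_twos_and_threes := by
  intro line _
  unfold Spec_twos_and_threes twos_and_threes twos_and_threes_alt
  rw [foldl_flags, counter_keys_map_getD]
  rw [runScan_spec_fuel (PySem.List.sorted line.toList (fun x => x) false).length _ le_rfl
    (by simpa using PySem.List.sorted_pairwise (xs := line.toList) (key := fun x => x))]
  have h2 : ((2:Int) ∈ (PySem.Dict.counter line.toList).values) ↔ ∃ c ∈ line.toList, line.toList.count c = 2 := by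
    simpa using mem_counter_values line.toList 2
  have h3 : ((3:Int) ∈ (PySem.Dict.counter line.toList).values) ↔ ∃ c ∈ line.toList, line.toList.count c = 3 := by
    simpa using mem_counter_values line.toList 3
  simp only [exists_count_sorted, h2, h3]
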